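-- pv_equiv track=rewrite | github.com/YounSangWoo/SWJG_weekly | week1/week1_algorithm/num_12/num_a12.py | get_each_point
-- ===== SOURCE A (Python) =====
-- def get_each_point(data):
--     list = []
--     for line in data:
--         point = 0
--         cur_point = 1
--         for OX in line:
--             if OX == "O":
--                 point += cur_point
--                 cur_point = cur_point + 1
--             elif OX == "X":
--                 cur_point = 1
--         list.append(point)
--     return list
-- ===== SOURCE B (Python) =====
-- def get_each_point(data):
--     result = []
--     for line in data:
--         total = 0
--         for seg in line.split("X"):
--             m = seg.count("O")
--             total += m * (m + 1) // 2
--         result.append(total)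
--     return result
-- ===== Notes on version B (the rewrite author's own statement) =====
-- stated objective: simpler
-- what changed: Replaces the per-character running-accumulator loop with splitting each line on 'X' and adding the triangular number m*(m+1)//2 of the 'O'-count m of each segment.
import Mathlib
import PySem

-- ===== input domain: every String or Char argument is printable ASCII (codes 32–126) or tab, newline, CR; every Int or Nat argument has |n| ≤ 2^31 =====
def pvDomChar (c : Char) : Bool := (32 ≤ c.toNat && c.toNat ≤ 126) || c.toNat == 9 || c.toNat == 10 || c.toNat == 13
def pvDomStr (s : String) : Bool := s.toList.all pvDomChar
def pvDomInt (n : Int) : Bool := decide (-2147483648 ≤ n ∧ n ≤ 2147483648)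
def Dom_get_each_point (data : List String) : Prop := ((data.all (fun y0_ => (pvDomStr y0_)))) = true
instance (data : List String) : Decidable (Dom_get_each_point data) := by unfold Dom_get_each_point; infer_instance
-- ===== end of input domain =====

-- B replaces A's per-character running accumulator by splitting each line on 'X' and
-- summing the triangular number of each segment's 'O'-count (simpler decomposition, same cost).

-- ===== PORT A =====
-- for line: point=0; cur_point=1; for OX in line: … ; append point
def get_each_point (data : List String) : List Int :=
  data.map (fun line =>
    (line.toList.foldl (fun (st : Int × Int) (OX : Char) =>
        if OX = 'O' then (st.1 + st.2, st.2 + 1)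
        else if OX = 'X' then (st.1, 1)
        else st)
      (0, 1)).1)

-- ===== PORT B =====
-- for line: total = Σ over line.split("X") of m*(m+1)//2 with m = seg.count("O")
def get_each_point_alt (data : List String) : List Int :=
  data.map (fun line =>
    (PySem.Chars.splitOn line.toList ['X']).foldl
      (fun (total : Int) seg =>
        let m : Int := (PySem.Chars.count seg ['O'] : Int)
        total + PySem.Int.floordiv (m * (m + 1)) 2)
      0)

-- ===== PRECONDITION & SPEC =====
def Spec_get_each_point (data : List String) (out : List Int) : Prop := out = get_each_point_alt data
instance (data : List String) (out : List Int) : Decidable (Spec_get_each_point data out) := by unfold Spec_get_each_point; infer_instance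

-- ===== CLAIM (what is proved, stated in full; the proofs are below) =====
def Claim_equal_get_each_point : Prop := ∀ (data : List String), Dom_get_each_point data → Spec_get_each_point data (get_each_point data)

-- ===== LEMMAS AND PROOFS =====

/-- A's per-character step function (definitionally the lambda in the port) -/
def pvF (st : Int × Int) (OX : Char) : Int × Int :=
  if OX = 'O' then (st.1 + st.2, st.2 + 1)
  else if OX = 'X' then (st.1, 1)
  else st

/-- triangular numbers -/
def pvTri : Nat → Int
  | 0 => 0
  | n + 1 => pvTri n + (n + 1)

/-- split a char list on 'X': (first segment, remaining segments) -/
def pvSplitX : List Char → List Char × List (List Char)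
  | [] => ([], [])
  | c :: rest =>
      let r := pvSplitX rest
      if c = 'X' then ([], r.1 :: r.2) else (c :: r.1, r.2)

/-- sum of triangular numbers of O-counts over a list of segments -/
def pvSumTri (ss : List (List Char)) : Int := (ss.map (fun s => pvTri (s.count 'O'))).sum

lemma pv_count_go (fuel : Nat) : ∀ (l : List Char) (acc : Nat), l.length ≤ fuel →
    PySem.Chars.count.go ['O'] fuel l acc = acc + l.count 'O' := by
  induction fuel with
  | zero =>
    intro l acc h
    have : l = [] := List.eq_nil_of_length_eq_zero (Nat.le_zero.mp h)
    subst this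
    simp [PySem.Chars.count.go]
  | succ n ih =>
    intro l acc h
    cases l with
    | nil => simp [PySem.Chars.count.go]
    | cons c t =>
      by_cases hc : c = 'O'
      · subst hc
        have hp : (['O'].isPrefixOf ('O' :: t)) = true := by simp [List.isPrefixOf]
        simp only [PySem.Chars.count.go, hp, if_true, List.length, List.drop]
        rw [ih t (acc + 1) (by simpa using Nat.lt_succ_iff.mp (by simpa using h))]
        simp
        omega
      · have hp : (['O'].isPrefixOf (c :: t)) = false := by
          simp [List.isPrefixOf]; exact fun h' => hc h'.symm
        simp only [PySem.Chars.count.go, hp]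
        rw [ih t acc (by simpa using Nat.lt_succ_iff.mp (by simpa using h))]
        simp [hc]

lemma pv_count_eq (l : List Char) : PySem.Chars.count l ['O'] = l.count 'O' := by
  simp [PySem.Chars.count, pv_count_go l.length l 0 le_rfl]

lemma pv_tri_closed (n : Nat) : PySem.Int.floordiv ((n : Int) * ((n : Int) + 1)) 2 = pvTri n := by
  induction n with
  | zero => simp [pvTri, PySem.Int.floordiv]
  | succ k ih =>
    have hrw : (((k : Int) + 1)) * (((k : Int) + 1) + 1) = (k : Int) * ((k : Int) + 1) + 2 * ((k : Int) + 1) := by ring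
    have hfd : PySem.Int.floordiv ((k : Int) * ((k : Int) + 1) + 2 * ((k : Int) + 1)) 2
        = PySem.Int.floordiv ((k : Int) * ((k : Int) + 1)) 2 + ((k : Int) + 1) := by
      simp only [PySem.Int.floordiv, Int.fdiv_eq_ediv]
      omega
    push_cast
    rw [hrw, hfd, ih]
    simp [pvTri]

lemma pv_splitOn_go (fuel : Nat) : ∀ (l cur : List Char) (acc : List (List Char)),
    l.length < fuel →
    PySem.Chars.splitOn.go ['X'] fuel l cur acc =
      acc.reverse ++ (cur.reverse ++ (pvSplitX l).1) :: (pvSplitX l).2 := by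
  induction fuel with
  | zero => intro l cur acc h; omega
  | succ n ih =>
    intro l cur acc h
    cases l with
    | nil => simp [PySem.Chars.splitOn.go, pvSplitX]
    | cons c t =>
      by_cases hc : c = 'X'
      · subst hc
        have hp : (['X'].isPrefixOf ('X' :: t)) = true := by simp [List.isPrefixOf]
        simp only [PySem.Chars.splitOn.go, hp, if_true, List.length, List.drop]
        rw [ih t [] (cur.reverse :: acc) (by simpa using Nat.lt_succ_iff.mp (by simpa using h))]
        simp [pvSplitX]
      · have hp : (['X'].isPrefixOf (c :: t)) = false := by
          simp [List.isPrefixOf]; exact fun h' => hc h'.symm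
        simp only [PySem.Chars.splitOn.go, hp]
        rw [ih t (c :: cur) acc (by simpa using Nat.lt_succ_iff.mp (by simpa using h))]
        simp [pvSplitX, hc]

lemma pv_splitOn_eq (l : List Char) :
    PySem.Chars.splitOn l ['X'] = (pvSplitX l).1 :: (pvSplitX l).2 := by
  simp [PySem.Chars.splitOn, pv_splitOn_go (l.length + 1) l [] [] (by omega)]

lemma pv_tri_succ (c : Nat) : pvTri (c + 1) = pvTri c + (c + 1) := rfl

lemma pv_fold_inv (cs : List Char) : ∀ (p : Int) (c : Nat),
    (cs.foldl pvF (p, (c : Int) + 1)).1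
    = p - pvTri c + pvTri (c + ((pvSplitX cs).1.count 'O')) + pvSumTri (pvSplitX cs).2 := by
  induction cs with
  | nil => intro p c; simp [pvSplitX, pvSumTri]
  | cons x t ih =>
    intro p c
    rw [List.foldl_cons]
    by_cases hO : x = 'O'
    · subst hO
      have hst : pvF (p, (c : Int) + 1) 'O' = (p + ((c : Int) + 1), ((c : Int) + 1) + 1) := by
        simp [pvF]
      rw [hst]
      have h := ih (p + ((c : Int) + 1)) (c + 1)
      push_cast at h
      rw [h]
      simp only [pvSplitX, if_neg (by decide : ¬('O' = 'X'))]
      simp only [List.count_cons, beq_self_eq_true, if_true]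
      generalize List.count 'O' (pvSplitX t).1 = m
      rw [pv_tri_succ]
      have harg : c + 1 + m = c + (m + 1) := by omega
      rw [harg]
      ring
    · by_cases hX : x = 'X'
      · subst hX
        have hst : pvF (p, (c : Int) + 1) 'X' = (p, ((0 : Nat) : Int) + 1) := by
          simp [pvF]
        rw [hst]
        rw [ih p 0]
        simp only [pvSplitX]
        simp [pvSumTri, pvTri]
        ring
      · have hst : pvF (p, (c : Int) + 1) x = (p, (c : Int) + 1) := by
          simp [pvF, hO, hX]
        rw [hst, ih p c]
        simp [pvSplitX, hX, hO]

lemma pv_foldl_add_tri (ss : List (List Char)) : ∀ (t0 : Int),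
    ss.foldl (fun (total : Int) seg =>
      let m : Int := (PySem.Chars.count seg ['O'] : Int)
      total + PySem.Int.floordiv (m * (m + 1)) 2) t0
    = t0 + pvSumTri ss := by
  induction ss with
  | nil => intro t0; simp [pvSumTri]
  | cons s rest ih =>
    intro t0
    rw [List.foldl_cons, ih]
    simp only [pvSumTri, List.map_cons, List.sum_cons, pv_count_eq, pv_tri_closed]
    ring

lemma pv_line_eq (line : List Char) :
    (line.foldl pvF (0, 1)).1
    = (PySem.Chars.splitOn line ['X']).foldl
        (fun (total : Int) seg =>
          let m : Int := (PySem.Chars.count seg ['O'] : Int)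
          total + PySem.Int.floordiv (m * (m + 1)) 2) 0 := by
  rw [pv_splitOn_eq, pv_foldl_add_tri]
  have h := pv_fold_inv line 0 0
  norm_num at h
  rw [h]
  simp [pvSumTri, pvTri]

-- ===== VERDICT (by name: the statement is the Claim_ definition above) =====
theorem get_each_point_spec : Claim_equal_get_each_point := by
  intro data _
  unfold Spec_get_each_point get_each_point get_each_point_alt
  exact List.map_congr_left (fun line _ => pv_line_eq line.toList)
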